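-- pv_equiv track=rewrite | github.com/SamuelPouyade/secu_informatique | TP1/exo2.py | get_all_multiple
-- ===== SOURCE A (Python) =====
-- def get_all_multiple (number: int) -> [int]:
--     '''
--     Fonction permettant d'avoir tout les multiples d'un nombre
--     :param number: Le nombre à analyser
--     :return: L'ensemble des multiples et le nombre analysé
--     '''
--     half_number = number // 2
--     all_multiple = []
--     all_multiple.append(number)
--
--     # On ajoute un car la boucle for exclu la valeur N
--     for i in range(2, half_number + 1):
--         if number % i == 0:
--             all_multiple.append(i)
--
--     return all_multiple
-- ===== SOURCE B (Python) =====
-- def get_all_multiple(number: int) -> [int]: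
--     # Enumerate divisor pairs up to sqrt(number): each small divisor i yields
--     # its cofactor number // i; smalls come out ascending, bigs descending,
--     # so the ascending result is [number] + small + reversed(big) -- no sort.
--     small = []
--     big = []
--     i = 2
--     while i * i <= number:
--         if number % i == 0:
--             small.append(i)
--             j = number // i
--             if j != i:
--                 big.append(j)
--         i += 1
--     return [number] + small + big[::-1]
-- ===== Notes on version B (the rewrite author's own statement) =====
-- stated objective: faster
-- what changed: A scans every candidate 2..n//2 and tests divisibility; B enumerates divisor pairs (i, n//i) only while i*i <= n, collecting small divisors ascending and cofactors descending, and returns [n] + small + reversed(big) with no sort.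
import Mathlib
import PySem

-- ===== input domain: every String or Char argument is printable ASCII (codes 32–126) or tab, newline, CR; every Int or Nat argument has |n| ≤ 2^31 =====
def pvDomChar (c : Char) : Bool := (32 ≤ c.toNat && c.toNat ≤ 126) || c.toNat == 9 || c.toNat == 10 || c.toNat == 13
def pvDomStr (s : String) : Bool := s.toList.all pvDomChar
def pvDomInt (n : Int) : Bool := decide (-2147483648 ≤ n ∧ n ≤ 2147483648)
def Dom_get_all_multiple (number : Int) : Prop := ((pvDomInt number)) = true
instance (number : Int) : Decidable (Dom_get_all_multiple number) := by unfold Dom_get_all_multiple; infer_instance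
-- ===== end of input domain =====

-- B replaces A's linear scan of 2..n//2 by a sqrt(n) divisor-pair enumeration
-- (small divisors ascending, cofactors descending, concatenated) — faster, same values.

-- ===== PORT A =====
def get_all_multiple (number : Int) : List Int :=
  let half_number := PySem.Int.floordiv number 2
  (PySem.List.pyRange 2 (half_number + 1) 1).foldl
    (fun all_multiple i =>
      if PySem.Int.mod number i == 0 then all_multiple ++ [i] else all_multiple)
    [number]

-- ===== PORT B =====
-- termination fact the loop below cites: i*i ≤ n forces i ≤ n
theorem pvSqLoop_le (n i : Int) (h : i * i ≤ n) : i ≤ n := by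
  nlinarith [mul_self_nonneg i, mul_self_nonneg (i - 1)]

-- the while-loop of Source B: state (i, small, big)
def pvDivLoop (n i : Int) (small big : List Int) : List Int × List Int :=
  if h : i * i ≤ n then
    if PySem.Int.mod n i == 0 then
      pvDivLoop n (i + 1) (small ++ [i])
        (if PySem.Int.floordiv n i != i then big ++ [PySem.Int.floordiv n i] else big)
    else pvDivLoop n (i + 1) small big
  else (small, big)
termination_by (n + 1 - i).toNat
decreasing_by
  all_goals (have := pvSqLoop_le n i h; omega)

def get_all_multiple_alt (number : Int) : List Int :=
  let p := pvDivLoop number 2 [] []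
  -- big[::-1] is List.reverse (PySem.List.slice?_none_none_neg_one)
  [number] ++ p.1 ++ p.2.reverse

-- ===== PRECONDITION & SPEC =====
def Spec_get_all_multiple (number : Int) (out : List Int) : Prop := out = get_all_multiple_alt number
instance (number : Int) (out : List Int) : Decidable (Spec_get_all_multiple number out) := by unfold Spec_get_all_multiple; infer_instance

-- ===== CLAIM (what is proved, stated in full; the proofs are below) =====
def Claim_equal_get_all_multiple : Prop := ∀ (number : Int), Dom_get_all_multiple number → Spec_get_all_multiple number (get_all_multiple number)

-- ===== LEMMAS AND PROOFS =====

-- closed forms for the two lists pvDivLoop accumulates from lower bound i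
def pvSm (n i : Int) : List Int :=
  (PySem.List.pyRange i (n + 1) 1).filter
    (fun k => decide (k * k ≤ n) && (PySem.Int.mod n k == 0))

def pvBgKs (n i : Int) : List Int :=
  (PySem.List.pyRange i (n + 1) 1).filter
    (fun k => decide (k * k ≤ n) && ((PySem.Int.mod n k == 0) && (PySem.Int.floordiv n k != k)))

def pvBg (n i : Int) : List Int := (pvBgKs n i).map (fun k => PySem.Int.floordiv n k)

lemma pvFilter_nil (n i : Int) (hi : 2 ≤ i) (hno : ¬ i * i ≤ n) (q : Int → Bool) :
    (PySem.List.pyRange i (n + 1) 1).filter (fun k => decide (k * k ≤ n) && q k) = [] := by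
  rw [List.filter_eq_nil_iff]
  intro k hk
  rw [PySem.List.mem_pyRange_one] at hk
  have hkk : ¬ k * k ≤ n := by nlinarith [hk.1]
  simp [hkk]

lemma pvDivLoop_eq (n : Int) (fuel : Nat) : ∀ (i : Int), 2 ≤ i → (n + 1 - i).toNat ≤ fuel →
    ∀ small big, pvDivLoop n i small big = (small ++ pvSm n i, big ++ pvBg n i) := by
  induction fuel with
  | zero =>
    intro i hi hf small big
    have hin : n < i := by omega
    have hno : ¬ i * i ≤ n := by nlinarith
    rw [pvDivLoop, dif_neg hno]
    rw [pvSm, pvBg, pvBgKs, pvFilter_nil n i hi hno, pvFilter_nil n i hi hno]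
    simp
  | succ fuel ih =>
    intro i hi hf small big
    by_cases hle : i * i ≤ n
    · have hilen : i ≤ n := pvSqLoop_le n i hle
      have hcons : PySem.List.pyRange i (n + 1) 1 = i :: PySem.List.pyRange (i + 1) (n + 1) 1 :=
        PySem.List.pyRange_one_cons (by omega)
      have hih := ih (i + 1) (by omega) (by omega)
      rw [pvDivLoop, dif_pos hle]
      by_cases hmod : (PySem.Int.mod n i == 0) = true
      · have hS : pvSm n i = i :: pvSm n (i + 1) := by
          rw [pvSm, pvSm, hcons, List.filter_cons]
          simp [hle, hmod]
        rw [if_pos hmod]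
        by_cases hne : (PySem.Int.floordiv n i != i) = true
        · have hB : pvBg n i = PySem.Int.floordiv n i :: pvBg n (i + 1) := by
            rw [pvBg, pvBg, pvBgKs, pvBgKs, hcons, List.filter_cons]
            simp [hle, hmod, hne]
          rw [if_pos hne, hih, hS, hB]
          simp
        · rw [Bool.not_eq_true] at hne
          have hB : pvBg n i = pvBg n (i + 1) := by
            rw [pvBg, pvBg, pvBgKs, pvBgKs, hcons, List.filter_cons]
            simp [hle, hmod, hne]
          rw [if_neg (by simp [hne]), hih, hS, hB]
          simp
      · rw [Bool.not_eq_true] at hmod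
        have hS : pvSm n i = pvSm n (i + 1) := by
          rw [pvSm, pvSm, hcons, List.filter_cons]
          simp [hle, hmod]
        have hB : pvBg n i = pvBg n (i + 1) := by
          rw [pvBg, pvBg, pvBgKs, pvBgKs, hcons, List.filter_cons]
          simp [hle, hmod]
        rw [if_neg (by simp [hmod]), hih, hS, hB]
    · rw [pvDivLoop, dif_neg hle]
      rw [pvSm, pvBg, pvBgKs, pvFilter_nil n i hi hle, pvFilter_nil n i hi hle]
      simp

-- membership characterisations (main case n ≥ 4)
lemma pvSm_mem (n d : Int) : d ∈ pvSm n 2 ↔ 2 ≤ d ∧ d * d ≤ n ∧ d ∣ n := by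
  simp only [pvSm, List.mem_filter, PySem.List.mem_pyRange_one, Bool.and_eq_true,
    decide_eq_true_eq, beq_iff_eq, PySem.Int.mod_eq_zero_iff_dvd]
  constructor
  · tauto
  · rintro ⟨h1, h2, h3⟩
    have hd := pvSqLoop_le n d h2
    exact ⟨⟨h1, by omega⟩, h2, h3⟩

lemma pvBgKs_mem (n k : Int) :
    k ∈ pvBgKs n 2 ↔ (2 ≤ k ∧ k < n + 1) ∧ k * k ≤ n ∧ k ∣ n ∧ PySem.Int.floordiv n k ≠ k := by
  simp only [pvBgKs, List.mem_filter, PySem.List.mem_pyRange_one, Bool.and_eq_true,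
    decide_eq_true_eq, beq_iff_eq, bne_iff_ne, PySem.Int.mod_eq_zero_iff_dvd]

lemma pvBg_mem (n d : Int) (hn : 4 ≤ n) :
    d ∈ pvBg n 2 ↔ 2 ≤ d ∧ n < d * d ∧ d * 2 ≤ n ∧ d ∣ n := by
  constructor
  · rintro hd
    rw [pvBg, List.mem_map] at hd
    obtain ⟨k, hk, rfl⟩ := hd
    rw [pvBgKs_mem] at hk
    obtain ⟨⟨hk2, _⟩, hkk, hkdvd, hne⟩ := hk
    have hkpos : (0:Int) < k := by omega
    rw [PySem.Int.floordiv_eq_ediv_of_pos hkpos] at hne ⊢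
    have hdk : n / k * k = n := Int.ediv_mul_cancel hkdvd
    have hkd : k ≤ n / k := le_of_mul_le_mul_right (by nlinarith) hkpos
    have hlt : k < n / k := lt_of_le_of_ne hkd (Ne.symm hne)
    refine ⟨by omega, by nlinarith, by nlinarith, ⟨k, hdk.symm⟩⟩
  · rintro ⟨hd2, hdd, hd2n, hdvd⟩
    have hdpos : (0:Int) < d := by omega
    have hkd : n / d * d = n := Int.ediv_mul_cancel hdvd
    set k := n / d with hkdef
    have hk2 : 2 ≤ k := le_of_mul_le_mul_right (by nlinarith) hdpos
    have hklt : k < d := lt_of_mul_lt_mul_right (by nlinarith) (le_of_lt hdpos)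
    have hkpos : (0:Int) < k := by omega
    have hkk : k * k ≤ n := by nlinarith
    have hkdvd : k ∣ n := ⟨d, by linarith [hkd]⟩
    have hnk : n / k = d := by
      have : n = d * k := by linarith [hkd]
      rw [this, Int.mul_ediv_cancel d (ne_of_gt hkpos)]
    rw [pvBg, List.mem_map]
    refine ⟨k, ?_, ?_⟩
    · rw [pvBgKs_mem]
      refine ⟨⟨hk2, by have := pvSqLoop_le n k hkk; omega⟩, hkk, hkdvd, ?_⟩
      rw [PySem.Int.floordiv_eq_ediv_of_pos hkpos, hnk]; omega
    · rw [PySem.Int.floordiv_eq_ediv_of_pos hkpos, hnk]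

-- A's loop output characterised
lemma pvA_mem (n d : Int) :
    d ∈ (PySem.List.pyRange 2 (PySem.Int.floordiv n 2 + 1) 1).filter
        (fun i => PySem.Int.mod n i == 0) ↔ 2 ≤ d ∧ d * 2 ≤ n ∧ d ∣ n := by
  simp only [List.mem_filter, PySem.List.mem_pyRange_one, beq_iff_eq,
    PySem.Int.mod_eq_zero_iff_dvd]
  have hb : d < PySem.Int.floordiv n 2 + 1 ↔ d * 2 ≤ n := by
    have := PySem.Int.le_floordiv_iff_mul_le (a := n) (b := 2) (q := d) (by omega)
    omega
  constructor
  · rintro ⟨⟨h1, h2⟩, h3⟩; exact ⟨h1, hb.mp h2, h3⟩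
  · rintro ⟨h1, h2, h3⟩; exact ⟨⟨h1, hb.mpr h2⟩, h3⟩

lemma pvUnion (n d : Int) (hn : 4 ≤ n) :
    (2 ≤ d ∧ d * 2 ≤ n ∧ d ∣ n) ↔
      (2 ≤ d ∧ d * d ≤ n ∧ d ∣ n) ∨ (2 ≤ d ∧ n < d * d ∧ d * 2 ≤ n ∧ d ∣ n) := by
  constructor
  · rintro ⟨h1, h2, h3⟩
    by_cases h : d * d ≤ n
    · exact Or.inl ⟨h1, h, h3⟩
    · exact Or.inr ⟨h1, by omega, h2, h3⟩
  · rintro (⟨h1, h2, h3⟩ | ⟨h1, _, h3, h4⟩)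
    · obtain ⟨m, hm⟩ := h3
      have hdpos : (0:Int) < d := by omega
      have hdm : d ≤ m := by nlinarith
      refine ⟨h1, by nlinarith, m, hm⟩
    · exact ⟨h1, h3, h4⟩

-- order facts
lemma pvSm_sorted (n : Int) : (pvSm n 2).Pairwise (· < ·) :=
  (PySem.List.pairwise_lt_pyRange_one _ _).filter _

lemma pvBg_rev_sorted (n : Int) : (pvBg n 2).reverse.Pairwise (· < ·) := by
  rw [List.pairwise_reverse, pvBg, List.pairwise_map]
  refine List.Pairwise.imp_of_mem ?_ ((PySem.List.pairwise_lt_pyRange_one _ _).filter _)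
  intro a b ha hb hab
  rw [pvBgKs_mem] at ha hb
  obtain ⟨⟨ha2, _⟩, haa, hadvd, _⟩ := ha
  obtain ⟨⟨hb2, _⟩, hbb, hbdvd, _⟩ := hb
  have hapos : (0:Int) < a := by omega
  have hbpos : (0:Int) < b := by omega
  rw [PySem.Int.floordiv_eq_ediv_of_pos hapos, PySem.Int.floordiv_eq_ediv_of_pos hbpos]
  have hda : n / a * a = n := Int.ediv_mul_cancel hadvd
  have hdb : n / b * b = n := Int.ediv_mul_cancel hbdvd
  have hdbpos : 1 ≤ n / b := le_of_mul_le_mul_right (by nlinarith) hbpos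
  by_contra hcon
  rw [not_lt] at hcon
  nlinarith

lemma pvB_tail_sorted (n : Int) (hn : 4 ≤ n) :
    (pvSm n 2 ++ (pvBg n 2).reverse).Pairwise (· < ·) := by
  rw [List.pairwise_append]
  refine ⟨pvSm_sorted n, pvBg_rev_sorted n, ?_⟩
  intro a ha b hb
  rw [List.mem_reverse] at hb
  rw [pvSm_mem] at ha
  rw [pvBg_mem n b hn] at hb
  obtain ⟨ha2, haa, _⟩ := ha
  obtain ⟨hb2, hbb, _, _⟩ := hb
  by_contra hcon
  rw [not_lt] at hcon
  nlinarith

lemma pvMain (n : Int) (hn : 4 ≤ n) :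
    (PySem.List.pyRange 2 (PySem.Int.floordiv n 2 + 1) 1).filter
        (fun i => PySem.Int.mod n i == 0) = pvSm n 2 ++ (pvBg n 2).reverse := by
  have hLA := PySem.List.pairwise_lt_pyRange_one 2 (PySem.Int.floordiv n 2 + 1) |>.filter
    (fun i => PySem.Int.mod n i == 0)
  have hLB := pvB_tail_sorted n hn
  refine PySem.List.eq_of_perm_of_pairwise_le_of_injective (fun x => x)
    (fun a b h => h) ?_ (hLA.imp le_of_lt) (hLB.imp le_of_lt)
  rw [List.perm_ext_iff_of_nodup (hLA.imp fun h => ne_of_lt h) (hLB.imp fun h => ne_of_lt h)]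
  intro d
  rw [pvA_mem, List.mem_append, List.mem_reverse, pvSm_mem, pvBg_mem n d hn,
    pvUnion n d hn]

lemma pvSmall_nil (n : Int) (hn : n < 4) : pvSm n 2 = [] ∧ pvBgKs n 2 = [] := by
  have h : ∀ (q : Int → Bool),
      (PySem.List.pyRange 2 (n + 1) 1).filter (fun k => decide (k * k ≤ n) && q k) = [] := by
    intro q
    rw [List.filter_eq_nil_iff]
    intro k hk
    rw [PySem.List.mem_pyRange_one] at hk
    have hkk : ¬ k * k ≤ n := by nlinarith [hk.1, hk.2]
    simp [hkk]
  exact ⟨h _, h _⟩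

-- ===== VERDICT (by name: the statement is the Claim_ definition above) =====
theorem get_all_multiple_spec : Claim_equal_get_all_multiple := by
  intro n _
  unfold Spec_get_all_multiple get_all_multiple get_all_multiple_alt
  rw [PySem.List.foldl_append_if_eq_filter]
  rw [pvDivLoop_eq n (n + 1 - 2).toNat 2 (by omega) (by omega) [] []]
  simp only [List.nil_append]
  by_cases hn : 4 ≤ n
  · rw [pvMain n hn, List.append_assoc]
  · rw [not_le] at hn
    obtain ⟨hs, hb⟩ := pvSmall_nil n hn
    have hr : PySem.List.pyRange 2 (PySem.Int.floordiv n 2 + 1) 1 = [] := by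
      refine PySem.List.pyRange_one_eq_nil ?_
      have := (PySem.Int.floordiv_lt_iff_lt_mul (a := n) (b := 2) (q := 2) (by omega)).mpr
        (by omega)
      omega
    rw [hr, hs, pvBg, hb]
    simp
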